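-- pv_equiv track=rewrite | github.com/dmt94/algorithms-ds | recursion/top-down/exercises.py | rf_count_str
-- ===== SOURCE A (Python) =====
-- def rf_count_str(arr):
--     count = 0
--
--     if len(arr) == 0:
--       return 0
--
--     # base case
--     if len(arr) == 1:
--       count += len(arr[0])
--       return count
--
--     else:
--       #the strucure, what are you adding up to, usually there is the original input's first element value that you utilize in this step
--       count += len(arr[0]) + rf_count_str(arr[1:])
--       return count
-- ===== SOURCE B (Python) =====
-- def rf_count_str(arr):
--     count = 0
--     for s in arr:
--         count += len(s)
--     return count
-- ===== Notes on version B (the rewrite author's own statement) =====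
-- stated objective: faster
-- what changed: Replaces the recursive decomposition (which copies the list tail via slicing on every call, and recurses) by a single iterative pass with a running accumulator.
import Mathlib
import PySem

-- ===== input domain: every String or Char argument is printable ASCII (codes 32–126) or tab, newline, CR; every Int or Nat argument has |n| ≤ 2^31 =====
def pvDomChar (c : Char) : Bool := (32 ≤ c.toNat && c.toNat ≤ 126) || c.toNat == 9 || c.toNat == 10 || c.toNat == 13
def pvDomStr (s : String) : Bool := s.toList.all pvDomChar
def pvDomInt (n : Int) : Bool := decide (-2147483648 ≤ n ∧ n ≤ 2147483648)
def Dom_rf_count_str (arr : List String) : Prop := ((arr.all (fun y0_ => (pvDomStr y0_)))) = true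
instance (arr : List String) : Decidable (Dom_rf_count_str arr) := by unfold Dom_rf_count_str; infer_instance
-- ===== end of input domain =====

-- B replaces A's slicing recursion by a single iterative accumulator loop (simpler; return value only).

-- ===== PORT A =====
-- A: if empty return 0; if singleton return len(arr[0]); else len(arr[0]) + recurse on arr[1:].
def rf_count_str (arr : List String) : Int :=
  match arr with
  | [] => 0
  | [s] => 0 + PySem.Str.len s
  | s :: rest => 0 + (PySem.Str.len s + rf_count_str rest)

-- ===== PORT B =====
-- B: count = 0; for s in arr: count += len(s); return count.
def rf_count_str_alt (arr : List String) : Int :=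
  arr.foldl (fun count s => count + PySem.Str.len s) 0

-- ===== PRECONDITION & SPEC =====
def Spec_rf_count_str (arr : List String) (out : Int) : Prop := out = rf_count_str_alt arr
instance (arr : List String) (out : Int) : Decidable (Spec_rf_count_str arr out) := by unfold Spec_rf_count_str; infer_instance

-- ===== CLAIM (what is proved, stated in full; the proofs are below) =====
def Claim_equal_rf_count_str : Prop := ∀ (arr : List String), Dom_rf_count_str arr → Spec_rf_count_str arr (rf_count_str arr)

-- ===== LEMMAS AND PROOFS =====
theorem foldl_len_shift (rest : List String) (a : Int) :
    rest.foldl (fun count s => count + PySem.Str.len s) a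
      = a + rest.foldl (fun count s => count + PySem.Str.len s) 0 := by
  induction rest generalizing a with
  | nil => simp
  | cons t ts ih =>
    simp only [List.foldl_cons]
    rw [ih (a + PySem.Str.len t), ih (0 + PySem.Str.len t)]
    ring

theorem rf_count_str_alt_cons (s : String) (rest : List String) :
    rf_count_str_alt (s :: rest) = PySem.Str.len s + rf_count_str_alt rest := by
  unfold rf_count_str_alt
  simp only [List.foldl_cons, zero_add]
  exact foldl_len_shift rest _

theorem rf_count_str_eq_alt (arr : List String) : rf_count_str arr = rf_count_str_alt arr := by
  induction arr with
  | nil => rfl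
  | cons s rest ih =>
    cases rest with
    | nil => simp [rf_count_str, rf_count_str_alt]
    | cons t ts =>
      rw [rf_count_str_alt_cons]
      simp [rf_count_str] at ih ⊢
      rw [ih]

-- ===== VERDICT (by name: the statement is the Claim_ definition above) =====
theorem rf_count_str_spec : Claim_equal_rf_count_str := by
  intro arr _
  unfold Spec_rf_count_str
  exact rf_count_str_eq_alt arr
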